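-- pv_equiv track=rewrite | github.com/j4ngzzz/Nightjar | src/nightjar/stages/formal.py | deinterleave_progress
-- ===== SOURCE A (Python) =====
-- def deinterleave_progress(lines: list[str]) -> list[str]:
--     """Sort interleaved Dafny --progress output for clean display.
--
--     Per Scout 5 caveat: 'With --vcsCores:4, output becomes interleaved.
--     Need to parse and deinterleave for clean display.'
--
--     Strategy: stable sort — Verifying lines before Verified lines for
--     each symbol, preserving order within each group.
--
--     Args:
--         lines: List of progress output lines (potentially interleaved).
--
--     Returns:
--         Sorted list where each symbol's 'Verifying' precedes 'Verified'.
--     """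
--     # Separate into verifying (in-progress) and verified (complete) groups
--     verifying = [l for l in lines if l.strip().startswith("Verifying")]
--     verified = [l for l in lines if l.strip().startswith("Verified:")]
--     other = [
--         l for l in lines
--         if not l.strip().startswith(("Verifying", "Verified:"))
--     ]
--     # Return in logical order: in-progress first, then completed, then other
--     return verifying + verified + other
-- ===== SOURCE B (Python) =====
-- def deinterleave_progress(lines: list[str]) -> list[str]:
--     """Stable sort by category rank: Verifying (0), Verified: (1), other (2)."""
--     def rank(l: str) -> int:
--         s = l.strip()
--         if s.startswith("Verifying"):
--             return 0
--         if s.startswith("Verified:"):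
--             return 1
--         return 2
--     return sorted(lines, key=rank)
-- ===== Notes on version B (the rewrite author's own statement) =====
-- stated objective: idiomatic
-- what changed: Replaces three filtering passes plus concatenation with a single stable sort keyed by a 3-valued category rank (Verifying=0, Verified:=1, other=2); stability preserves within-group order.
import Mathlib
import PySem

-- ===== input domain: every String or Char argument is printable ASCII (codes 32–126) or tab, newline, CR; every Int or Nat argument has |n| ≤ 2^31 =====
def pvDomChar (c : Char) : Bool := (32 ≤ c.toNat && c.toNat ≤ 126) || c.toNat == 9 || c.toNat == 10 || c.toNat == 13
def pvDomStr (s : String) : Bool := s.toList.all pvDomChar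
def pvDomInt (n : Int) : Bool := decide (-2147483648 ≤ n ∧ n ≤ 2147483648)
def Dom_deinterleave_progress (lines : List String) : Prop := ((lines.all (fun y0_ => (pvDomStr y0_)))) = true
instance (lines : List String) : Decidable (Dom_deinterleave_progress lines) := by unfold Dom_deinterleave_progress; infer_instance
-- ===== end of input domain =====

-- B replaces A's three filtering passes + concatenation by one stable sort keyed on a
-- 3-valued category rank (idiomatic; no speed claim).

-- ===== PORT A =====
def deinterleave_progress (lines : List String) : List String :=
  let verifying := lines.filter (fun l => PySem.Str.startswith (PySem.Str.strip l) "Verifying")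
  let verified := lines.filter (fun l => PySem.Str.startswith (PySem.Str.strip l) "Verified:")
  let other := lines.filter (fun l =>
    !(PySem.Str.startswith (PySem.Str.strip l) "Verifying"
      || PySem.Str.startswith (PySem.Str.strip l) "Verified:"))
  verifying ++ verified ++ other

-- ===== PORT B =====
def pvRank (l : String) : Int :=
  if PySem.Str.startswith (PySem.Str.strip l) "Verifying" then 0
  else if PySem.Str.startswith (PySem.Str.strip l) "Verified:" then 1
  else 2

def deinterleave_progress_alt (lines : List String) : List String :=
  PySem.List.sorted lines pvRank

-- ===== PRECONDITION & SPEC =====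
def Spec_deinterleave_progress (lines : List String) (out : List String) : Prop := out = deinterleave_progress_alt lines
instance (lines : List String) (out : List String) : Decidable (Spec_deinterleave_progress lines out) := by unfold Spec_deinterleave_progress; infer_instance

-- ===== CLAIM (what is proved, stated in full; the proofs are below) =====
def Claim_equal_deinterleave_progress : Prop := ∀ (lines : List String), Dom_deinterleave_progress lines → Spec_deinterleave_progress lines (deinterleave_progress lines)

-- ===== LEMMAS AND PROOFS =====

-- A stripped line cannot start with both "Verifying" and "Verified:".
theorem pv_not_both (s : String) (h : PySem.Str.startswith s "Verified:" = true) :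
    PySem.Str.startswith s "Verifying" = false := by
  by_contra hne
  have h1 : PySem.Str.startswith s "Verifying" = true := by
    cases hb : PySem.Str.startswith s "Verifying" with
    | false => exact absurd hb hne
    | true => rfl
  have p1 : "Verifying".toList <+: s.toList := by
    have := h1
    simp [PySem.Str.startswith, PySem.Chars.startswith, List.isPrefixOf_iff_prefix] at this
    exact this
  have p2 : "Verified:".toList <+: s.toList := by
    have := h
    simp [PySem.Str.startswith, PySem.Chars.startswith, List.isPrefixOf_iff_prefix] at this
    exact this
  rcases List.prefix_or_prefix_of_prefix p1 p2 with hp | hp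
  · exact absurd hp (by decide)
  · exact absurd hp (by decide)

theorem pvRank_cases (x : String) : pvRank x = 0 ∨ pvRank x = 1 ∨ pvRank x = 2 := by
  unfold pvRank; split_ifs <;> simp

theorem insertBy_cons_pos {α : Type} (before : α → α → Bool) (x y : α) (ys : List α)
    (h : before x y = true) :
    PySem.List.insertBy before x (y :: ys) = x :: y :: ys := by
  simp [PySem.List.insertBy, h]

theorem insertBy_append {α : Type} (before : α → α → Bool) (x : α) (l t : List α)
    (h : ∀ y ∈ l, before x y = false) :
    PySem.List.insertBy before x (l ++ t) = l ++ PySem.List.insertBy before x t := by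
  induction l with
  | nil => simp
  | cons a l ih =>
    have ha : before x a = false := h a (by simp)
    simp only [List.cons_append, PySem.List.insertBy, ha]
    simp [ih (fun y hy => h y (by simp [hy]))]

-- stable sort by the 3-valued rank = the three rank-filters concatenated
theorem sorted_rank (xs : List String) :
    PySem.List.sorted xs pvRank =
      xs.filter (fun l => pvRank l == 0) ++ xs.filter (fun l => pvRank l == 1)
        ++ xs.filter (fun l => pvRank l == 2) := by
  rw [PySem.List.sorted_eq_foldl_insertBy]
  induction xs using List.reverseRecOn with
  | nil => simp
  | append_singleton xs x ih =>
    rw [List.foldl_append, List.foldl_cons, List.foldl_nil, ih]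
    simp only [List.filter_append, List.filter_cons, List.filter_nil]
    set before : String → String → Bool := fun a b => decide (pvRank a < pvRank b) with hb
    have memf : ∀ (k : Int) y, y ∈ xs.filter (fun l => pvRank l == k) → pvRank y = k := by
      intro k y hy
      have := List.of_mem_filter hy
      simpa using this
    rcases pvRank_cases x with h | h | h
    · -- rank 0: insert right after the rank-0 block
      have pass0 : ∀ y ∈ xs.filter (fun l => pvRank l == 0), before x y = false := by
        intro y hy; have := memf 0 y hy; simp [hb, this, h]
      rw [List.append_assoc, insertBy_append before x _ _ pass0]
      have htail : PySem.List.insertBy before x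
          (xs.filter (fun l => pvRank l == 1) ++ xs.filter (fun l => pvRank l == 2)) =
          x :: (xs.filter (fun l => pvRank l == 1) ++ xs.filter (fun l => pvRank l == 2)) := by
        cases htl : xs.filter (fun l => pvRank l == 1) ++ xs.filter (fun l => pvRank l == 2) with
        | nil => simp [PySem.List.insertBy]
        | cons y t =>
          have hy : y ∈ xs.filter (fun l => pvRank l == 1) ++ xs.filter (fun l => pvRank l == 2) := by
            rw [htl]; simp
          have hr : pvRank y = 1 ∨ pvRank y = 2 := by
            rcases List.mem_append.mp hy with h1 | h2
            · exact Or.inl (memf 1 y h1)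
            · exact Or.inr (memf 2 y h2)
          have hbt : before x y = true := by
            rcases hr with hr | hr <;> simp [hb, hr, h]
          exact insertBy_cons_pos before x y t hbt
      rw [htail]
      simp [h]
    · -- rank 1: insert after the rank-0 and rank-1 blocks
      have pass01 : ∀ y ∈ xs.filter (fun l => pvRank l == 0) ++ xs.filter (fun l => pvRank l == 1),
          before x y = false := by
        intro y hy
        rcases List.mem_append.mp hy with h0 | h1
        · have := memf 0 y h0; simp [hb, this, h]
        · have := memf 1 y h1; simp [hb, this, h]
      rw [insertBy_append before x _ _ pass01]
      have htail : PySem.List.insertBy before x (xs.filter (fun l => pvRank l == 2)) =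
          x :: xs.filter (fun l => pvRank l == 2) := by
        cases htl : xs.filter (fun l => pvRank l == 2) with
        | nil => simp [PySem.List.insertBy]
        | cons y t =>
          have hy : y ∈ xs.filter (fun l => pvRank l == 2) := by rw [htl]; simp
          have hr := memf 2 y hy
          exact insertBy_cons_pos before x y t (by simp [hb, hr, h])
      rw [htail]
      simp [h]
    · -- rank 2: append at the very end
      have passall : ∀ y ∈ xs.filter (fun l => pvRank l == 0) ++ (xs.filter (fun l => pvRank l == 1)
          ++ xs.filter (fun l => pvRank l == 2)), before x y = false := by
        intro y hy
        rcases List.mem_append.mp hy with h0 | h12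
        · have := memf 0 y h0; simp [hb, this, h]
        · rcases List.mem_append.mp h12 with h1 | h2
          · have := memf 1 y h1; simp [hb, this, h]
          · have := memf 2 y h2; simp [hb, this, h]
      rw [List.append_assoc, PySem.List.insertBy_of_forall_not_before before x _ passall]
      simp [h]

-- ===== VERDICT (by name: the statement is the Claim_ definition above) =====
theorem deinterleave_progress_spec : Claim_equal_deinterleave_progress := by
  intro lines _
  unfold Spec_deinterleave_progress deinterleave_progress deinterleave_progress_alt
  rw [sorted_rank]
  have e0 : lines.filter (fun l => PySem.Str.startswith (PySem.Str.strip l) "Verifying")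
      = lines.filter (fun l => pvRank l == 0) := by
    apply List.filter_congr
    intro l _
    cases hA : PySem.Str.startswith (PySem.Str.strip l) "Verifying" <;>
      cases hB : PySem.Str.startswith (PySem.Str.strip l) "Verified:" <;>
      simp only [pvRank, hA, hB] <;>
      first
        | decide
        | exact absurd hA (by rw [pv_not_both _ hB]; simp)
  have e1 : lines.filter (fun l => PySem.Str.startswith (PySem.Str.strip l) "Verified:")
      = lines.filter (fun l => pvRank l == 1) := by
    apply List.filter_congr
    intro l _
    cases hA : PySem.Str.startswith (PySem.Str.strip l) "Verifying" <;>
      cases hB : PySem.Str.startswith (PySem.Str.strip l) "Verified:" <;>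
      simp only [pvRank, hA, hB] <;>
      first
        | decide
        | exact absurd hA (by rw [pv_not_both _ hB]; simp)
  have e2 : lines.filter (fun l =>
        !(PySem.Str.startswith (PySem.Str.strip l) "Verifying"
          || PySem.Str.startswith (PySem.Str.strip l) "Verified:"))
      = lines.filter (fun l => pvRank l == 2) := by
    apply List.filter_congr
    intro l _
    cases hA : PySem.Str.startswith (PySem.Str.strip l) "Verifying" <;>
      cases hB : PySem.Str.startswith (PySem.Str.strip l) "Verified:" <;>
      simp only [pvRank, hA, hB] <;>
      first
        | decide
        | exact absurd hA (by rw [pv_not_both _ hB]; simp)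
  rw [e0, e1, e2]
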